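-- pv_equiv track=rewrite | github.com/pgroon/vorox-automation | vpipeline/srt_to_ass.py | choose_two_line_split
-- ===== SOURCE A (Python) =====
-- def choose_two_line_split(tokens: list[str], max_words: int = 6) -> int | None:
--     """
--     Return k (1..n-1) meaning: put tokens[:k] on line 1, tokens[k:] on line 2.
--     Return None => single line.
--     """
--     n = len(tokens)
--     if n <= 3:
--         return None
--
--     if n > max_words:
--         n = max_words
--         tokens = tokens[:n]
--
--     best_k = 3  # default
--     best_score: int | None = None
--
--     for k in range(1, n):
--         left = " ".join(tokens[:k])
--         right = " ".join(tokens[k:])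
--         score = abs(len(left) - len(right))
--
--         # avoid widows (1-word line)
--         if k == 1 or k == n - 1:
--             score += 5
--
--         if best_score is None or score < best_score:
--             best_score = score
--             best_k = k
--
--     return best_k
-- ===== SOURCE B (Python) =====
-- def choose_two_line_split(tokens: list[str], max_words: int = 6) -> int | None:
--     """
--     Return k (1..n-1) meaning: put tokens[:k] on line 1, tokens[k:] on line 2.
--     Return None => single line.
--
--     Staged-pass reformulation: build a prefix-sum table of token lengths once,
--     tabulate every candidate's score arithmetically (left rendered length is
--     pref[k]+k-1, right is total-pref[k]+n-k-1, so the imbalance is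
--     |2*(pref[k]+k)-total-n|; no join strings are ever built), then pick the
--     first minimising k with min(), whose first-extremal rule gives the
--     first-strict-minimum tie-break.
--     """
--     n = len(tokens)
--     if n <= 3:
--         return None
--
--     if n > max_words:
--         n = max_words
--         tokens = tokens[:n]
--
--     pref = [0]
--     for t in tokens:
--         pref.append(pref[-1] + len(t))
--     total = pref[-1]
--
--     scores = [abs(2 * (pref[k] + k) - total - n) + (5 if k == 1 or k == n - 1 else 0)
--               for k in range(1, n)]
--     return min(range(1, n), key=lambda k: scores[k - 1])
-- ===== Notes on version B (the rewrite author's own statement) =====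
-- stated objective: faster
-- what changed: Replaces A's single stateful best-so-far loop over " ".join strings by staged passes: a prefix-sum table of token lengths, a tabulated score list derived arithmetically (no join strings are ever built), and min() with a key giving the first-minimum selection.
-- outside the precondition, e.g. on choose_two_line_split(['a', 'b', 'c', 'd'], 1): A returns 3, B raises ValueError; on choose_two_line_split(['a', 'b', 'c', 'd'], -2): A returns 3, B raises ValueError
import Mathlib
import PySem

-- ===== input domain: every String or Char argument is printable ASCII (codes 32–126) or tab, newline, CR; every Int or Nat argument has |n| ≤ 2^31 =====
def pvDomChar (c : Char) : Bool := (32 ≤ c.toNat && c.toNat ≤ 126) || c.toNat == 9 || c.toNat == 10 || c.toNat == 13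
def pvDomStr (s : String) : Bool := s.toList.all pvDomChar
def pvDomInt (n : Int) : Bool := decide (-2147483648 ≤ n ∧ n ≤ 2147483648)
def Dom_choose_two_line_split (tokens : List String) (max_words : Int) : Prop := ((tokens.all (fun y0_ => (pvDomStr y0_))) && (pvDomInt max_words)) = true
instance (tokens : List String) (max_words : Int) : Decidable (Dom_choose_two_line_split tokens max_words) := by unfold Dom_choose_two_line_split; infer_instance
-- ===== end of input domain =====

-- B replaces A's single best-so-far loop over " ".join strings by staged passes
-- (prefix-sum table, tabulated arithmetic scores, min() with a key); objective: alternative.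

-- ===== PORT A =====
def choose_two_line_split (tokens : List String) (max_words : Int) : Option Int :=
  let n : Int := PySem.List.len tokens
  if n ≤ 3 then none
  else
    let n2 : Int := if n > max_words then max_words else n
    let toks : List String := if n > max_words then PySem.List.slice tokens none (some n2) else tokens
    let st := (PySem.List.pyRange 1 n2).foldl (fun (st : Int × Option Int) k =>
        let left := PySem.Str.join " " (PySem.List.slice toks none (some k))
        let right := PySem.Str.join " " (PySem.List.slice toks (some k) none)
        let score0 := |PySem.Str.len left - PySem.Str.len right|
        let score := if k = 1 ∨ k = n2 - 1 then score0 + 5 else score0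
        match st.2 with
        | none => (k, some score)
        | some bs => if score < bs then (k, some score) else st)
      (3, none)
    some st.1

-- ===== PORT B =====
def choose_two_line_split_alt (tokens : List String) (max_words : Int) : Option Int :=
  let n : Int := PySem.List.len tokens
  if n ≤ 3 then none
  else
    let n2 : Int := if n > max_words then max_words else n
    let toks : List String := if n > max_words then PySem.List.slice tokens none (some n2) else tokens
    let pref : List Int := toks.foldl (fun p t => p ++ [PySem.List.pyGetD p (-1) 0 + PySem.Str.len t]) [0]
    let total : Int := PySem.List.pyGetD pref (-1) 0
    let scores : List Int := (PySem.List.pyRange 1 n2).map (fun k =>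
        |2 * (PySem.List.pyGetD pref k 0 + k) - total - n2| + (if k = 1 ∨ k = n2 - 1 then 5 else 0))
    -- Python's min() over the empty range raises ValueError; min? returns none there (outside Pre_)
    PySem.List.min? (PySem.List.pyRange 1 n2) (fun k => PySem.List.pyGetD scores (k - 1) 0)

-- ===== PRECONDITION & SPEC =====
-- Pre_ excludes only the degenerate inputs with more than 3 tokens and max_words < 2,
-- where A returns its leftover default 3 (a split point that does not exist) while
-- B's min() over the empty candidate range raises ValueError.
def Pre_choose_two_line_split (tokens : List String) (max_words : Int) : Prop :=
  tokens.length ≤ 3 ∨ 2 ≤ max_words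
instance (tokens : List String) (max_words : Int) : Decidable (Pre_choose_two_line_split tokens max_words) := by unfold Pre_choose_two_line_split; infer_instance

def pvWitness_choose_two_line_split : List String × Int := (["hello", "there", "big", "wide", "world"], 6)

def Spec_choose_two_line_split (tokens : List String) (max_words : Int) (out : Option Int) : Prop := out = choose_two_line_split_alt tokens max_words
instance (tokens : List String) (max_words : Int) (out : Option Int) : Decidable (Spec_choose_two_line_split tokens max_words out) := by unfold Spec_choose_two_line_split; infer_instance

-- ===== CLAIM (what is proved, stated in full; the proofs are below) =====
def Claim_equal_choose_two_line_split : Prop := ∀ (tokens : List String) (max_words : Int), Dom_choose_two_line_split tokens max_words → Pre_choose_two_line_split tokens max_words → Spec_choose_two_line_split tokens max_words (choose_two_line_split tokens max_words)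

-- ===== LEMMAS AND PROOFS =====

-- length of " ".join(ps) for nonempty ps, on code-point lists
theorem pv_chars_join_len (ps : List (List Char)) (h : ps ≠ []) :
    ((PySem.Chars.join [' '] ps).length : Int) = (ps.map (fun p => (p.length : Int))).sum + ps.length - 1 := by
  induction ps with
  | nil => simp at h
  | cons p rest ih =>
    cases rest with
    | nil => simp [PySem.Chars.join_singleton]
    | cons q rest' =>
      rw [PySem.Chars.join_cons_cons]
      have h2 := ih (by simp)
      simp only [List.length_append, List.map_cons, List.sum_cons, List.length_cons, List.length_nil] at h2 ⊢
      push_cast at h2 ⊢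
      omega

-- length of " ".join(ps) for nonempty ps, as an Int
theorem pv_join_len (ps : List String) (h : ps ≠ []) :
    PySem.Str.len (PySem.Str.join " " ps) = (ps.map PySem.Str.len).sum + ps.length - 1 := by
  rw [PySem.Str.len_eq, PySem.Str.toList_join]
  have hsep : (" " : String).toList = [' '] := by decide
  rw [hsep]
  have h3 := pv_chars_join_len (ps.map String.toList) (by simpa using h)
  simp only [List.map_map, List.length_map] at h3
  rw [h3]
  have h4 : List.map ((fun p : List Char => ((p.length : Int))) ∘ String.toList) ps = List.map PySem.Str.len ps :=
    List.map_congr_left (fun x _ => by simp [PySem.Str.len_eq])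
  rw [h4]

theorem pv_getD_neg_one (xs : List Int) (x : Int) : PySem.List.pyGetD (xs ++ [x]) (-1) 0 = x := by
  simp [PySem.List.pyGetD, PySem.List.pyGet?_neg_one_append_singleton]

-- B's prefix fold is a scanl of the running length sum
theorem pv_pref_eq_scanl (ts : List String) :
    ts.foldl (fun p t => p ++ [PySem.List.pyGetD p (-1) 0 + PySem.Str.len t]) [0]
      = List.scanl (fun s t => s + PySem.Str.len t) 0 ts := by
  suffices h : ∀ (ts : List String) (acc : List Int) (x : Int),
      ts.foldl (fun p t => p ++ [PySem.List.pyGetD p (-1) 0 + PySem.Str.len t]) (acc ++ [x])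
        = acc ++ List.scanl (fun s t => s + PySem.Str.len t) x ts by
    simpa using h ts [] 0
  intro ts
  induction ts with
  | nil => intro acc x; simp [List.scanl]
  | cons t rest ih =>
    intro acc x
    simp only [List.foldl_cons, List.scanl]
    rw [pv_getD_neg_one]
    have := ih (acc ++ [x]) (x + PySem.Str.len t)
    simpa using this

-- pref[k] is the sum of the lengths of the first k tokens
theorem pv_pref_getD (ts : List String) (k : Nat) (hk : k ≤ ts.length) :
    PySem.List.pyGetD
      (ts.foldl (fun p t => p ++ [PySem.List.pyGetD p (-1) 0 + PySem.Str.len t]) [0]) (k : Int) 0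
      = ((ts.take k).map PySem.Str.len).sum := by
  rw [pv_pref_eq_scanl, PySem.List.pyGetD_natCast]
  have hlen : k < (List.scanl (fun s t => s + PySem.Str.len t) 0 ts).length := by
    simp [List.length_scanl]; omega
  rw [List.getD_eq_getElem _ _ hlen, List.getElem_scanl]
  rw [← List.foldl_map, List.sum_eq_foldl]

-- pref[-1] is the sum of all token lengths
theorem pv_pref_total (ts : List String) :
    PySem.List.pyGetD
      (ts.foldl (fun p t => p ++ [PySem.List.pyGetD p (-1) 0 + PySem.Str.len t]) [0]) (-1) 0
      = (ts.map PySem.Str.len).sum := by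
  rw [pv_pref_eq_scanl]
  have hne : List.scanl (fun s t => s + PySem.Str.len t) 0 ts ≠ [] := by
    cases ts <;> simp [List.scanl]
  rw [← List.dropLast_append_getLast hne, pv_getD_neg_one]
  rw [List.getLast_eq_getElem, List.getElem_scanl]
  have h : (List.scanl (fun s t => s + PySem.Str.len t) 0 ts).length - 1 = ts.length := by
    simp [List.length_scanl]
  rw [h, List.take_of_length_le le_rfl]
  rw [← List.foldl_map, List.sum_eq_foldl]

-- B's key, looked up at k ∈ range(1, n2), is B's arithmetic score of k
theorem pv_scores_getD (g : Int → Int) (n2 : Int) (j : Nat) (h1 : 1 ≤ j) (h2 : (j : Int) < n2) :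
    PySem.List.pyGetD ((PySem.List.pyRange 1 n2).map g) ((j : Int) - 1) 0 = g j := by
  have hcast : ((j : Int) - 1) = ((j - 1 : Nat) : Int) := by omega
  rw [hcast, PySem.List.pyGetD_natCast, PySem.List.pyRange_one, List.map_map]
  rw [PySem.List.getD_map_range _ _ _ _ (by omega)]
  simp only [Function.comp_apply]
  congr 1
  omega

-- A's score (via string joins) equals B's arithmetic score for each candidate k
theorem pv_score_eq (toks : List String) (n2 : Int) (hL : (toks.length : Int) = n2)
    (k : Int) (hk : k ∈ PySem.List.pyRange 1 n2) :
    (if k = 1 ∨ k = n2 - 1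
      then |PySem.Str.len (PySem.Str.join " " (PySem.List.slice toks none (some k)))
              - PySem.Str.len (PySem.Str.join " " (PySem.List.slice toks (some k) none))| + 5
      else |PySem.Str.len (PySem.Str.join " " (PySem.List.slice toks none (some k)))
              - PySem.Str.len (PySem.Str.join " " (PySem.List.slice toks (some k) none))|)
    = PySem.List.pyGetD
        ((PySem.List.pyRange 1 n2).map (fun k =>
          |2 * (PySem.List.pyGetD
                  (toks.foldl (fun p t => p ++ [PySem.List.pyGetD p (-1) 0 + PySem.Str.len t]) [0]) k 0 + k)
            - PySem.List.pyGetD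
                  (toks.foldl (fun p t => p ++ [PySem.List.pyGetD p (-1) 0 + PySem.Str.len t]) [0]) (-1) 0 - n2|
          + (if k = 1 ∨ k = n2 - 1 then 5 else 0)))
        (k - 1) 0 := by
  rw [PySem.List.mem_pyRange_one] at hk
  obtain ⟨hk1, hk2⟩ := hk
  obtain ⟨j, rfl⟩ : ∃ j : Nat, k = (j : Int) := ⟨k.toNat, (Int.toNat_of_nonneg (by omega)).symm⟩
  rw [pv_scores_getD _ _ j (by omega) hk2]
  have hjle : j ≤ toks.length := by omega
  have htoksne : toks ≠ [] := List.ne_nil_of_length_pos (by omega)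
  have h1 : PySem.List.slice toks none (some ((j : Nat) : Int)) = toks.take j := by
    rw [PySem.List.slice_to _ (by omega)]; simp
  have h2 : PySem.List.slice toks (some ((j : Nat) : Int)) none = toks.drop j := by
    rw [PySem.List.slice_from _ (by omega)]; simp
  have htne : toks.take j ≠ [] := by
    simp only [ne_eq, List.take_eq_nil_iff, not_or]
    exact ⟨by omega, htoksne⟩
  have hdne : toks.drop j ≠ [] := by
    simp only [ne_eq, List.drop_eq_nil_iff]; omega
  have hsplit : ((toks.take j).map PySem.Str.len).sum + ((toks.drop j).map PySem.Str.len).sum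
      = (toks.map PySem.Str.len).sum := by
    rw [← List.sum_append, ← List.map_append, List.take_append_drop]
  have hlen1 : (toks.take j).length = j := by simp [hjle]
  have hlen2 : (toks.drop j).length = toks.length - j := by simp
  rw [h1, h2, pv_join_len _ htne, pv_join_len _ hdne, pv_pref_getD toks j hjle, pv_pref_total,
      hlen1, hlen2]
  have habs : |((toks.take j).map PySem.Str.len).sum + (j : Int) - 1
        - (((toks.drop j).map PySem.Str.len).sum + ((toks.length - j : Nat) : Int) - 1)|
      = |2 * (((toks.take j).map PySem.Str.len).sum + (j : Int)) - (toks.map PySem.Str.len).sum - n2| := by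
    congr 1
    omega
  split_ifs with h
  · rw [habs]
  · rw [habs]; omega

-- the fold of min?'s step from a some-state is the plain first-argmin fold
theorem pv_minfold_some (f : Int → Int) (t : List Int) (c : Int) :
    t.foldl (fun acc k =>
        match acc with
        | none => some k
        | some m => if f k < f m then some k else some m) (some c)
      = some (t.foldl (fun m k => if f k < f m then k else m) c) := by
  induction t generalizing c with
  | nil => rfl
  | cons k t ih =>
    simp only [List.foldl_cons]
    split_ifs <;> exact ih _

-- A's best-tracking loop from a some-state is the same plain first-argmin fold
theorem pv_firstmin (f : Int → Int) (t : List Int) (c : Int) :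
    t.foldl (fun (st : Int × Option Int) k =>
        match st.2 with
        | none => (k, some (f k))
        | some bs => if f k < bs then (k, some (f k)) else st) (c, some (f c))
      = (t.foldl (fun m k => if f k < f m then k else m) c,
         some (f (t.foldl (fun m k => if f k < f m then k else m) c))) := by
  induction t generalizing c with
  | nil => rfl
  | cons k t ih =>
    simp only [List.foldl_cons]
    split_ifs with h
    · exact ih k
    · exact ih c

-- min? on a nonempty list is the plain first-argmin fold (stated on min? itself)
theorem pv_min?_cons (f : Int → Int) (t : List Int) (x : Int) :
    PySem.List.min? (x :: t) f = some (t.foldl (fun m k => if f k < f m then k else m) x) := by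
  have h : PySem.List.min? (x :: t) f
      = t.foldl (fun acc k =>
          match acc with
          | none => some k
          | some m => if f k < f m then some k else some m) (some x) := by
    unfold PySem.List.min?
    simp only [List.foldl_cons]
    congr 1
    · funext acc k
      cases acc <;> rfl
  rw [h, pv_minfold_some]

-- the shared core: A's loop over any score key agrees with min? over that key
theorem pv_loop_eq_min? (f : Int → Int) (n2 : Int) (h2 : 2 ≤ n2) :
    some (((PySem.List.pyRange 1 n2).foldl (fun (st : Int × Option Int) k =>
        match st.2 with
        | none => (k, some (f k))
        | some bs => if f k < bs then (k, some (f k)) else st) (3, none)).1)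
      = PySem.List.min? (PySem.List.pyRange 1 n2) f := by
  have hc : PySem.List.pyRange 1 n2 = 1 :: PySem.List.pyRange 2 n2 :=
    PySem.List.pyRange_one_cons (by omega)
  rw [hc, pv_min?_cons]
  show some ((List.foldl (fun (st : Int × Option Int) k =>
      match st.2 with
      | none => (k, some (f k))
      | some bs => if f k < bs then (k, some (f k)) else st)
    (1, some (f 1)) (PySem.List.pyRange 2 n2)).1) = _
  rw [pv_firstmin]

-- ===== VERDICT (by name: the statement is the Claim_ definition above) =====
set_option maxHeartbeats 1000000 in
theorem choose_two_line_split_spec : Claim_equal_choose_two_line_split := by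
  intro tokens max_words _ hpre
  show choose_two_line_split tokens max_words = choose_two_line_split_alt tokens max_words
  by_cases hn : PySem.List.len tokens ≤ 3
  · simp only [choose_two_line_split, choose_two_line_split_alt, if_pos hn]
  · have hn4 : 4 ≤ (tokens.length : Int) := by
      simp only [PySem.List.len_eq] at hn; omega
    have hpre2 : 2 ≤ max_words := by
      rcases hpre with h | h
      · exfalso; omega
      · exact h
    by_cases ht : PySem.List.len tokens > max_words
    · simp only [choose_two_line_split, choose_two_line_split_alt, if_neg hn, if_pos ht]
      have hlen : ((PySem.List.slice tokens none (some max_words)).length : Int) = max_words := by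
        rw [PySem.List.slice_to _ (by omega), List.length_take]
        simp only [PySem.List.len_eq] at hn ht
        omega
      rw [← pv_loop_eq_min? _ max_words hpre2]
      refine congrArg (fun st : Int × Option Int => some st.1) ?_
      apply PySem.List.foldl_congr_mem
      intro acc k hk
      rw [pv_score_eq _ max_words hlen k hk]
    · simp only [choose_two_line_split, choose_two_line_split_alt, if_neg hn, if_neg ht]
      have hlen : ((tokens.length : Nat) : Int) = PySem.List.len tokens := by
        simp [PySem.List.len_eq]
      have h2 : 2 ≤ PySem.List.len tokens := by omega
      rw [← pv_loop_eq_min? _ _ h2]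
      refine congrArg (fun st : Int × Option Int => some st.1) ?_
      apply PySem.List.foldl_congr_mem
      intro acc k hk
      rw [pv_score_eq _ _ hlen k hk]
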